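-- pv_equiv track=rewrite | github.com/jbellogo/Algorithms | DAS-questions/mex_numbers.py | updateMEX
-- ===== SOURCE A (Python) =====
-- def findMEX(arr: list[int]) -> int:
--     if arr == []:
--         return 0
--
--     for min_val in range(0, arr[-1]+2):
--         if min_val not in arr:
--             for i in arr:
--                 if min_val < i:
--                     return min_val
--             return min_val
--
-- def updateMEX(num: int, arr: list[int]) -> int:
--     sorted_arr = sorted(arr)
--     oldMEX = findMEX(sorted_arr)
--     count = 0
--     while len(sorted_arr) > 0:
--         sorted_arr.remove(sorted_arr[0])
--         newMEX = findMEX(sorted_arr)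
--         count += 1
--         if newMEX != oldMEX:
--             return count
--     return -1
-- ===== SOURCE B (Python) =====
-- def updateMEX(num: int, arr: list[int]) -> int:
--     # MEX (smallest missing non-negative) changes under smallest-first removal
--     # exactly when the last 0 is removed; so the answer is the number of
--     # elements <= 0 if 0 is present, and -1 otherwise.
--     if 0 not in arr:
--         return -1
--     return sum(1 for x in arr if x <= 0)
-- ===== Notes on version B (the rewrite author's own statement) =====
-- stated objective: faster
-- what changed: Replaces the simulation (repeatedly re-sorting-free but re-scanning: remove the minimum and recompute the MEX by a membership scan over a value range) with a closed-form one-pass count: the MEX changes exactly when the last 0 is removed, so the answer is the count of elements <= 0 when 0 is present, else -1.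
-- intended difference: On non-empty arrays whose elements are all <= -2 A's findMEX helper scans the empty range(0, max+2) and returns None, so A returns len(arr) although the MEX (=0) never changes during removals; B returns -1, the intended 'MEX never changes' answer. — e.g. on updateMEX(0, [-2]): A returns 1, B returns -1
import Mathlib
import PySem

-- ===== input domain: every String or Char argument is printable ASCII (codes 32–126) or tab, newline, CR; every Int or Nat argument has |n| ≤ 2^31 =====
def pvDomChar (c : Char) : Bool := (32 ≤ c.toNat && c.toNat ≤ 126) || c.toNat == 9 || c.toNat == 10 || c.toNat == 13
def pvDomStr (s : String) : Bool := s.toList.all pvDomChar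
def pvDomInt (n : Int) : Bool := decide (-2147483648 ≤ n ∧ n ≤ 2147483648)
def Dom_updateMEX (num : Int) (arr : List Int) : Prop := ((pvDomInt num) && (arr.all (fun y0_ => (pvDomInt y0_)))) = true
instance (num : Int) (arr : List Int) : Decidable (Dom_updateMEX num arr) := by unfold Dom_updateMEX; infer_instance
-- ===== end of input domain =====

-- B replaces A's removal simulation by a closed-form count (0 present: count of elements <= 0, else -1);
-- on non-empty all-(<= -2) arrays A returns len(arr) (findMEX's range is empty, yielding None) while B
-- returns the intended -1, stated as D_ below.


-- ===== PORT A =====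
-- inner 'for i in arr: if min_val < i: return min_val' followed by 'return min_val'
def findMEXInner (arr : List Int) (v : Int) : Int :=
  match arr with
  | [] => v
  | i :: rest => if v < i then v else findMEXInner rest v

-- 'for min_val in range(0, arr[-1]+2): if min_val not in arr: …'; falling off the loop = Python's
-- implicit None. Python's range is lazy and the loop returns early, so it is ported as a counter
-- min_val starting at 0 with fuel = the range's length (exact: fuel n left at counter v means
-- the values v, v+1, …, v+n-1 of the range remain to be visited).
def findMEXLoop (arr : List Int) (v : Int) : Nat → Option Int
  | 0 => none
  | n + 1 => if v ∈ arr then findMEXLoop arr (v + 1) n else some (findMEXInner arr v)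

def findMEX (arr : List Int) : Option Int :=
  if arr = [] then some 0
  else findMEXLoop arr 0 ((PySem.List.pyGet? arr (-1)).getD 0 + 2).toNat

-- 'while len(sorted_arr) > 0: sorted_arr.remove(sorted_arr[0]); …'.
-- sorted_arr.remove(sorted_arr[0]) removes the FIRST occurrence of the head's value, which is the head
-- itself, so it is exactly dropping the head; ported as structural recursion on the tail (exact).
def updateLoop (oldMEX : Option Int) : List Int → Int → Int
  | [], _ => -1
  | _ :: rest, count =>
    let newMEX := findMEX rest
    if newMEX ≠ oldMEX then count + 1 else updateLoop oldMEX rest (count + 1)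

def updateMEX (num : Int) (arr : List Int) : Int :=
  let sorted_arr := PySem.List.sorted arr (fun x => x) false
  let oldMEX := findMEX sorted_arr
  updateLoop oldMEX sorted_arr 0

-- ===== PORT B =====
def updateMEX_alt (num : Int) (arr : List Int) : Int :=
  if (0 : Int) ∈ arr then
    arr.foldl (fun acc x => if x ≤ 0 then acc + 1 else acc) 0
  else -1

-- ===== PRECONDITION & SPEC =====
-- On non-empty arrays with every element <= -2, A's findMEX scans the empty range(0, max+2) and returns
-- None, so A returns len(arr) even though the MEX (= 0) never changes during the removals; B returns -1,
-- the intended value for 'the MEX never changes'.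
def D_updateMEX (num : Int) (arr : List Int) : Prop :=
  arr ≠ [] ∧ ∀ x ∈ arr, x ≤ -2
instance (num : Int) (arr : List Int) : Decidable (D_updateMEX num arr) := by unfold D_updateMEX; infer_instance

def Spec_updateMEX (num : Int) (arr : List Int) (out : Int) : Prop := ¬ D_updateMEX num arr → out = updateMEX_alt num arr
instance (num : Int) (arr : List Int) (out : Int) : Decidable (Spec_updateMEX num arr out) := by unfold Spec_updateMEX; infer_instance

def pvDiffWitness_updateMEX : Int × List Int := (0, [-2])
def pvDiffWitnessOut_updateMEX : Int × Int := (1, -1)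

-- ===== CLAIM (what is proved, stated in full; the proofs are below) =====
def Claim_unchanged_updateMEX : Prop := ∀ (num : Int) (arr : List Int), Dom_updateMEX num arr → Spec_updateMEX num arr (updateMEX num arr)
def Claim_changed_updateMEX : Prop := Dom_updateMEX (pvDiffWitness_updateMEX.1) (pvDiffWitness_updateMEX.2) ∧ D_updateMEX (pvDiffWitness_updateMEX.1) (pvDiffWitness_updateMEX.2) ∧ updateMEX (pvDiffWitness_updateMEX.1) (pvDiffWitness_updateMEX.2) = pvDiffWitnessOut_updateMEX.1 ∧ updateMEX_alt (pvDiffWitness_updateMEX.1) (pvDiffWitness_updateMEX.2) = pvDiffWitnessOut_updateMEX.2 ∧ pvDiffWitnessOut_updateMEX.1 ≠ pvDiffWitnessOut_updateMEX.2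
def Claim_exact_updateMEX : Prop := ∀ (num : Int) (arr : List Int), Dom_updateMEX num arr → D_updateMEX num arr → updateMEX num arr ≠ updateMEX_alt num arr

-- ===== LEMMAS AND PROOFS =====

theorem findMEXInner_eq (arr : List Int) (v : Int) : findMEXInner arr v = v := by
  induction arr with
  | nil => rfl
  | cons i rest ih => simp [findMEXInner, ih]

theorem getLast?_cons_ne (x : Int) (l : List Int) (h : l ≠ []) :
    (x :: l).getLast? = l.getLast? := by
  cases l with
  | nil => exact absurd rfl h
  | cons b t => simp [List.getLast?_cons_cons]

theorem findMEXLoop_congr (s1 s2 : List Int) (n : Nat) (v : Int) (hv : 0 ≤ v)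
    (h : ∀ w : Int, 0 ≤ w → (w ∈ s1 ↔ w ∈ s2)) :
    findMEXLoop s1 v n = findMEXLoop s2 v n := by
  induction n generalizing v with
  | zero => rfl
  | succ n ih =>
    have hw := h v hv
    by_cases hm : v ∈ s1
    · simp [findMEXLoop, hm, hw.mp hm, ih (v + 1) (by omega)]
    · have hm2 : v ∉ s2 := fun h2 => hm (hw.mpr h2)
      simp [findMEXLoop, hm, hm2, findMEXInner_eq]

theorem findMEXLoop_not_mem (s : List Int) (n : Nat) (v w : Int)
    (h : findMEXLoop s v n = some w) : w ∉ s := by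
  induction n generalizing v with
  | zero => simp [findMEXLoop] at h
  | succ n ih =>
    by_cases hm : v ∈ s
    · exact ih (v + 1) (by simpa [findMEXLoop, hm] using h)
    · simp [findMEXLoop, hm, findMEXInner_eq] at h
      exact h ▸ hm

theorem findMEX_not_mem (s : List Int) (v : Int) (h : findMEX s = some v) (hv : v ∈ s) : False := by
  rcases eq_or_ne s [] with rfl | hne
  · simp at hv
  · rw [findMEX, if_neg hne] at h
    exact findMEXLoop_not_mem _ _ _ _ h hv

-- findMEX of a list that misses 0 and is empty or has last element ≥ -1 is 'some 0'
theorem findMEX_zero (s : List Int) (h0 : (0:Int) ∉ s)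
    (h : s = [] ∨ ∃ m, s.getLast? = some m ∧ -1 ≤ m) : findMEX s = some 0 := by
  rcases h with rfl | ⟨m, hm, hm1⟩
  · rfl
  · have hne : s ≠ [] := by rintro rfl; simp at hm
    rw [findMEX, if_neg hne, PySem.List.pyGet?_neg_one, hm]
    simp only [Option.getD_some]
    have ht : (m + 2).toNat = (m + 1).toNat + 1 := by omega
    rw [ht]
    simp [findMEXLoop, h0, findMEXInner_eq]

theorem findMEX_none (s : List Int) (hne : s ≠ [])
    (h : ∃ m, s.getLast? = some m ∧ m ≤ -2) : findMEX s = none := by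
  rcases h with ⟨m, hm, hm2⟩
  rw [findMEX, if_neg hne, PySem.List.pyGet?_neg_one, hm]
  simp only [Option.getD_some]
  have ht : (m + 2).toNat = 0 := by omega
  rw [ht]
  rfl

theorem findMEX_cons (x : Int) (rest : List Int) (hne : rest ≠ [])
    (h : x < 0 ∨ x ∈ rest) : findMEX (x :: rest) = findMEX rest := by
  rw [findMEX, findMEX, if_neg (by simp), if_neg hne]
  rw [PySem.List.pyGet?_neg_one, PySem.List.pyGet?_neg_one, getLast?_cons_ne x rest hne]
  apply findMEXLoop_congr _ _ _ 0 le_rfl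
  intro w hw0
  constructor
  · intro hmem
    rcases List.mem_cons.mp hmem with rfl | hmem'
    · rcases h with hx | hx
      · omega
      · exact hx
    · exact hmem'
  · intro hmem; exact List.mem_cons_of_mem _ hmem

theorem getLast_ge (s : List Int) (hp : s.Pairwise (· ≤ ·)) (y : Int) (hy : y ∈ s) :
    ∃ m, s.getLast? = some m ∧ y ≤ m := by
  induction s generalizing y with
  | nil => simp at hy
  | cons a rest ih =>
    rcases eq_or_ne rest [] with rfl | hne
    · simp at hy; exact ⟨a, by simp, le_of_eq hy⟩
    · have hp' := (List.pairwise_cons.mp hp).2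
      obtain ⟨b, hb⟩ := List.exists_mem_of_ne_nil rest hne
      rcases List.mem_cons.mp hy with rfl | hy'
      · obtain ⟨m, hm, _⟩ := ih hp' b hb
        exact ⟨m, by rw [getLast?_cons_ne _ _ hne]; exact hm,
          (List.pairwise_cons.mp hp).1 m (List.mem_of_getLast? hm)⟩
      · obtain ⟨m, hm, hym⟩ := ih hp' y hy'
        exact ⟨m, by rw [getLast?_cons_ne _ _ hne]; exact hm, hym⟩

-- main loop invariant when 0 is present: the loop counts the elements ≤ 0
theorem loop_zero (s : List Int) (hp : s.Pairwise (· ≤ ·)) (h0 : (0:Int) ∈ s) (c : Int) :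
    updateLoop (findMEX s) s c = c + (s.countP (fun x => decide (x ≤ 0)) : Int) := by
  induction s generalizing c with
  | nil => simp at h0
  | cons x rest ih =>
    have hx : x ≤ 0 := by
      rcases List.mem_cons.mp h0 with h | h
      · omega
      · exact (List.pairwise_cons.mp hp).1 0 h
    have hp' := (List.pairwise_cons.mp hp).2
    by_cases hr : (0:Int) ∈ rest
    · have hne : rest ≠ [] := List.ne_nil_of_mem hr
      have heq : findMEX (x :: rest) = findMEX rest := by
        apply findMEX_cons x rest hne
        rcases eq_or_lt_of_le hx with rfl | hlt
        · right; simpa using hr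
        · left; exact hlt
      rw [updateLoop, heq]
      simp only [ne_eq, not_true_eq_false, if_false]
      rw [ih hp' hr]
      simp [List.countP_cons, hx]
      omega
    · -- x must be 0, and it is the last copy of 0
      have hx0 : x = 0 := by
        rcases List.mem_cons.mp h0 with h | h
        · omega
        · exact absurd h hr
      subst hx0
      have hnew : findMEX rest = some 0 := by
        apply findMEX_zero rest hr
        rcases eq_or_ne rest [] with rfl | hne
        · left; rfl
        · right
          obtain ⟨y, hy⟩ := List.exists_mem_of_ne_nil rest hne
          obtain ⟨m, hm, hym⟩ := getLast_ge rest hp' y hy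
          have : 0 ≤ y := (List.pairwise_cons.mp hp).1 y hy
          exact ⟨m, hm, by omega⟩
      have hold : findMEX ((0:Int) :: rest) ≠ some 0 := fun h =>
        findMEX_not_mem _ _ h (by simp)
      rw [updateLoop, hnew, if_pos (by simpa using fun h => hold h.symm)]
      have hcnt : rest.countP (fun x => decide (x ≤ 0)) = 0 := by
        rw [List.countP_eq_zero]
        intro y hy
        have h1 : 0 ≤ y := (List.pairwise_cons.mp hp).1 y hy
        have h2 : y ≠ 0 := by rintro rfl; exact hr hy
        simp; omega
      simp [List.countP_cons, hcnt]

-- when 0 is absent (and the maximum is ≥ -1) the MEX stays 0 and the loop runs off the list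
theorem loop_nozero (s : List Int) (h0 : (0:Int) ∉ s)
    (h : s = [] ∨ ∃ m, s.getLast? = some m ∧ -1 ≤ m) (c : Int) :
    updateLoop (some 0) s c = -1 := by
  induction s generalizing c with
  | nil => rfl
  | cons x rest ih =>
    have h0' : (0:Int) ∉ rest := fun hr => h0 (List.mem_cons_of_mem _ hr)
    rcases eq_or_ne rest [] with rfl | hne
    · rw [updateLoop]
      simp [findMEX]
      rfl
    · rcases h with h | ⟨m, hm, hm1⟩
      · exact absurd h (by simp)
      · rw [getLast?_cons_ne x rest hne] at hm
        have hnew : findMEX rest = some 0 := findMEX_zero rest h0' (Or.inr ⟨m, hm, hm1⟩)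
        rw [updateLoop, hnew, if_neg (by simp)]
        exact ih h0' (Or.inr ⟨m, hm, hm1⟩) (c + 1)

-- inside D_: the loop (with oldMEX = None) runs to the end and returns the length
theorem loop_none (s : List Int) (hne : s ≠ []) (hall : ∀ y ∈ s, y ≤ -2) (c : Int) :
    updateLoop none s c = c + (s.length : Int) := by
  induction s generalizing c with
  | nil => exact absurd rfl hne
  | cons x rest ih =>
    rcases eq_or_ne rest [] with rfl | hr
    · rw [updateLoop]
      simp [findMEX]
    · have hnew : findMEX rest = none := by
        apply findMEX_none rest hr
        exact ⟨rest.getLast hr, List.getLast?_eq_some_getLast hr,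
          hall _ (List.mem_cons_of_mem _ (List.getLast_mem hr))⟩
      rw [updateLoop, hnew, if_neg (by simp)]
      rw [ih hr (fun y hy => hall y (List.mem_cons_of_mem _ hy)) (c + 1)]
      simp; omega

theorem foldl_count (arr : List Int) (c : Int) :
    arr.foldl (fun acc x => if x ≤ 0 then acc + 1 else acc) c
      = c + (arr.countP (fun x => decide (x ≤ 0)) : Int) := by
  induction arr generalizing c with
  | nil => simp
  | cons x rest ih =>
    by_cases hx : x ≤ 0
    · simp [List.foldl_cons, hx, ih, List.countP_cons]; omega
    · simp [List.foldl_cons, hx, ih, List.countP_cons]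

-- ===== VERDICT (by name: the statement is the Claim_ definition above) =====
theorem updateMEX_spec : Claim_unchanged_updateMEX := by
  intro num arr _ hD
  unfold D_updateMEX at hD
  push_neg at hD
  set s := PySem.List.sorted arr (fun x => x) false with hs
  have hperm : s.Perm arr := PySem.List.sorted_perm arr (fun x => x) false
  have hp : s.Pairwise (· ≤ ·) := PySem.List.sorted_pairwise arr (fun x => x)
  rcases eq_or_ne arr [] with rfl | hne
  · have hsnil : s = [] := List.Perm.eq_nil hperm
    rw [updateMEX, updateMEX_alt]
    simp [← hs, hsnil]
    rfl
  · obtain ⟨y, hy, hy2⟩ := hD hne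
    have hy' : -1 ≤ y := by omega
    by_cases h0 : (0:Int) ∈ arr
    · have h0s : (0:Int) ∈ s := hperm.mem_iff.mpr h0
      rw [updateMEX, updateMEX_alt, if_pos h0]
      show updateLoop (findMEX s) s 0 = _
      rw [loop_zero s hp h0s 0, foldl_count, hperm.countP_eq]
    · have h0s : (0:Int) ∉ s := fun h => h0 (hperm.mem_iff.mp h)
      have hys : y ∈ s := hperm.mem_iff.mpr hy
      obtain ⟨m, hm, hym⟩ := getLast_ge s hp y hys
      have hold : findMEX s = some 0 := findMEX_zero s h0s (Or.inr ⟨m, hm, by omega⟩)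
      rw [updateMEX, updateMEX_alt, if_neg h0]
      show updateLoop (findMEX s) s 0 = -1
      rw [hold]
      exact loop_nozero s h0s (Or.inr ⟨m, hm, by omega⟩) 0

theorem updateMEX_changed : Claim_changed_updateMEX := by
  unfold Claim_changed_updateMEX; decide

theorem updateMEX_tight : Claim_exact_updateMEX := by
  intro num arr _ hD
  unfold D_updateMEX at hD
  obtain ⟨hne, hall⟩ := hD
  set s := PySem.List.sorted arr (fun x => x) false with hs
  have hperm : s.Perm arr := PySem.List.sorted_perm arr (fun x => x) false
  have hsne : s ≠ [] := fun h => hne (List.Perm.eq_nil (h ▸ hperm).symm)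
  have halls : ∀ y ∈ s, y ≤ -2 := fun y hy => hall y (hperm.mem_iff.mp hy)
  have h0 : (0:Int) ∉ arr := fun h => by have := hall 0 h; omega
  have hold : findMEX s = none := by
    apply findMEX_none s hsne
    exact ⟨s.getLast hsne, List.getLast?_eq_some_getLast hsne, halls _ (List.getLast_mem hsne)⟩
  have hA : updateMEX num arr = (arr.length : Int) := by
    rw [updateMEX]
    show updateLoop (findMEX s) s 0 = _
    rw [hold, loop_none s hsne halls 0, hperm.length_eq]
    simp
  have hB : updateMEX_alt num arr = -1 := by rw [updateMEX_alt, if_neg h0]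
  rw [hA, hB]
  have : arr.length ≠ 0 := fun h => hne (List.eq_nil_of_length_eq_zero h)
  omega
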